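-- pv_equiv track=rewrite | github.com/pvvng/algorithm | j-lab/5/5-2-3/1150.py | search_high
-- ===== SOURCE A (Python) =====
-- def search_high(target, A):
--   n = len(A)
--   res = n
--   low = 0
--   high = n - 1
--   while low <= high:
--     mid = (low + high) // 2
--     if target <= A[mid]:
--       res = mid
--       high = mid - 1
--     else:
--       low = mid + 1
--   return n - res
-- ===== SOURCE B (Python) =====
-- def search_high(target, A):
--     def locate(seg, off):
--         # returns the absolute index of the lower bound found in this segment, or None
--         if not seg:
--             return None
--         k = (len(seg) - 1) // 2
--         if target <= seg[k]:
--             found = locate(seg[:k], off)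
--             return off + k if found is None else found
--         return locate(seg[k + 1:], off + k + 1)
--
--     n = len(A)
--     pos = locate(A, 0)
--     return n - (n if pos is None else pos)
-- ===== Notes on version B (the rewrite author's own statement) =====
-- stated objective: alternative
-- what changed: Replaces A's iterative binary search over index bounds (mutable low/high/res with an n sentinel) by a divide-and-conquer recursion over actual list slices that returns an Option: the segment is physically split at its middle and the found boundary is threaded back as Some/None instead of a sentinel accumulator.
import Mathlib
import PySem

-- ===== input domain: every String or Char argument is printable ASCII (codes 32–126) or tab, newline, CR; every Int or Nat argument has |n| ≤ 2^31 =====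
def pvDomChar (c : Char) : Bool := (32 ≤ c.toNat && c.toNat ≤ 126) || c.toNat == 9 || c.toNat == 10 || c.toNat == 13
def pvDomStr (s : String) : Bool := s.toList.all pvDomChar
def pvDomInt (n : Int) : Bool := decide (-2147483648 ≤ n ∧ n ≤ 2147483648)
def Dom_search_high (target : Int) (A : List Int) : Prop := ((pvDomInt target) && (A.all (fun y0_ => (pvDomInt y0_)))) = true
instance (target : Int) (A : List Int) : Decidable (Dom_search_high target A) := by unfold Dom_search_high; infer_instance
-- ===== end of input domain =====

-- B replaces A's iterative binary search over index bounds (mutable low/high/res with an n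
-- sentinel) by a divide-and-conquer recursion on actual list slices returning an Option;
-- same result, objective: alternative.

-- ===== PORT A =====
-- A's while-loop, step for step: state (low, high, res) threaded through the recursion.
-- The Nat fuel only makes the recursion structural; with fuel ≥ high+1-low it never runs out.
def searchLoopA (target : Int) (A : List Int) (fuel : Nat) (low high res : Int) : Int :=
  match fuel with
  | 0 => res  -- fuel exhausted: never reached from search_high's call
  | Nat.succ f =>
    if low ≤ high then
      let mid := PySem.Int.floordiv (low + high) 2
      match PySem.List.pyGet? A mid with
      | some v =>
        if target ≤ v then searchLoopA target A f low (mid - 1) mid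
        else searchLoopA target A f (mid + 1) high res
      | none => res  -- Python would raise IndexError; unreachable from search_high's call
    else res

def search_high (target : Int) (A : List Int) : Int :=
  let n : Int := PySem.List.len A
  n - searchLoopA target A (A.length + 1) 0 (n - 1) n

-- ===== PORT B =====
-- B's helper `locate(seg, off)`: divide and conquer on list slices, boundary as an Option.
-- The Nat fuel only makes the recursion structural; with fuel ≥ seg.length it never runs out.
def locateB (target : Int) (fuel : Nat) (seg : List Int) (off : Int) : Option Int :=
  match fuel with
  | 0 => none  -- fuel exhausted: never reached from search_high_alt's call
  | Nat.succ f =>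
    if seg.isEmpty then none
    else
      let k : Nat := (seg.length - 1) / 2
      match seg[k]? with
      | some v =>
        if target ≤ v then
          match locateB target f (seg.take k) off with
          | none => some (off + (k : Int))
          | some found => some found
        else locateB target f (seg.drop (k + 1)) (off + (k : Int) + 1)
      | none => none  -- unreachable: k < seg.length on a nonempty seg

def search_high_alt (target : Int) (A : List Int) : Int :=
  let n : Int := PySem.List.len A
  n - (match locateB target (A.length + 1) A 0 with
       | none => n
       | some pos => pos)

-- ===== PRECONDITION & SPEC =====
def Spec_search_high (target : Int) (A : List Int) (out : Int) : Prop := out = search_high_alt target A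
instance (target : Int) (A : List Int) (out : Int) : Decidable (Spec_search_high target A out) := by unfold Spec_search_high; infer_instance

-- ===== CLAIM (what is proved, stated in full; the proofs are below) =====
def Claim_equal_search_high : Prop := ∀ (target : Int) (A : List Int), Dom_search_high target A → Spec_search_high target A (search_high target A)

-- ===== LEMMAS AND PROOFS =====

-- A's loop on the index window [low, high] equals B's recursion on the corresponding slice.
theorem loop_eq_locate (target : Int) (A : List Int) (f : Nat) :
    ∀ (low high res : Int), 0 ≤ low → high < (A.length : Int) →
      (high + 1 - low).toNat ≤ f →
      searchLoopA target A f low high res =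
        (match locateB target f ((A.drop low.toNat).take (high + 1 - low).toNat) low with
         | none => res
         | some p => p) := by
  induction f with
  | zero =>
    intro low high res hlow hhigh hf
    simp only [searchLoopA, locateB]
  | succ f ih =>
    intro low high res hlow hhigh hf
    by_cases h : low ≤ high
    · have hlen : ((A.drop low.toNat).take (high + 1 - low).toNat).length
          = (high + 1 - low).toNat := by
        simp [List.length_take, List.length_drop]; omega
      have hne : ¬ ((A.drop low.toNat).take (high + 1 - low).toNat).isEmpty := by
        rw [List.isEmpty_iff_length_eq_zero, hlen]
        omega
      rw [searchLoopA, if_pos h, locateB, if_neg hne]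
      simp only [hlen]
      obtain ⟨k, hk⟩ : ∃ k, ((high + 1 - low).toNat - 1) / 2 = k := ⟨_, rfl⟩
      have hkm : (k : Int) ≤ high - low ∧ 0 ≤ (k : Int) := by omega
      simp only [hk]
      have hmid : PySem.Int.floordiv (low + high) 2 = low + (k : Int) := by
        rw [PySem.Int.floordiv_eq_ediv_of_pos (by omega)]
        omega
      have hA : PySem.List.pyGet? A (PySem.Int.floordiv (low + high) 2)
          = some (A[low.toNat + k]'(by omega)) := by
        rw [hmid, PySem.List.pyGet?_eq_some_getElem A (by omega) (by omega)]
        simp only [show (low + (k : Int)).toNat = low.toNat + k from by omega]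
      have hB : ((A.drop low.toNat).take (high + 1 - low).toNat)[k]?
          = some (A[low.toNat + k]'(by omega)) := by
        rw [List.getElem?_eq_getElem (by omega)]
        simp only [List.getElem_take, List.getElem_drop]
      simp only [hA, hB]
      by_cases hle : target ≤ A[low.toNat + k]'(by omega)
      · rw [if_pos hle, if_pos hle, hmid,
            ih low ((low + (k : Int)) - 1) (low + (k : Int)) hlow (by omega) (by omega)]
        have hleft : (A.drop low.toNat).take ((low + (k : Int)) - 1 + 1 - low).toNat
            = ((A.drop low.toNat).take (high + 1 - low).toNat).take k := by
          rw [List.take_take]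
          congr 1; omega
        rw [hleft]
        cases locateB target f (((A.drop low.toNat).take (high + 1 - low).toNat).take k) low <;> rfl
      · rw [if_neg hle, if_neg hle, hmid,
            ih ((low + (k : Int)) + 1) high res (by omega) hhigh (by omega)]
        have hright : (A.drop (low + (k : Int) + 1).toNat).take (high + 1 - (low + (k : Int) + 1)).toNat
            = ((A.drop low.toNat).take (high + 1 - low).toNat).drop (k + 1) := by
          rw [List.drop_take, List.drop_drop]
          congr 1
          · omega
          · congr 1
            omega
        rw [hright]
    · have h0 : (high + 1 - low).toNat = 0 := by omega
      rw [searchLoopA, if_neg h, h0]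
      simp [locateB]

-- ===== VERDICT (by name: the statement is the Claim_ definition above) =====
theorem search_high_spec : Claim_equal_search_high := by
  intro target A _
  unfold Spec_search_high search_high search_high_alt
  simp only [PySem.List.len_eq]
  rw [loop_eq_locate target A (A.length + 1) 0 ((A.length : Int) - 1) (A.length : Int)
        le_rfl (by omega) (by omega)]
  have hseg : (A.drop (0 : Int).toNat).take (((A.length : Int) - 1) + 1 - 0).toNat = A := by
    simp
  rw [hseg]
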